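-- pv_equiv track=rewrite | github.com/Owez/mdcx | mdcx.py | _rm_toc
-- ===== SOURCE A (Python) =====
-- def _rm_toc(md: str) -> list:
--     """Removes first table of contents section from a markdown string, returning list of lines"""
--     # Don't check if there isn't one
--     check = md.lower()
--     if "table of contents" not in check and "contents" not in check:
--         return md.splitlines()
--     # Parse through
--     in_toc = False
--     removed_toc = False
--     keep = []
--     for line in md.splitlines():
--         clean = line.lstrip()
--         # Title, so either start/end toc removal
--         if clean.startswith("#") and not removed_toc:
--             # Stop removing toc
--             if in_toc:
--                 in_toc = False
--                 keep.append(line)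
--                 continue
--             # Start removing toc
--             title = clean.lstrip("#").strip().lower()
--             if title in ["table of contents", "contents"]:
--                 in_toc = True
--             else:
--                 keep.append(line)
--         # Add like normal
--         elif not in_toc:
--             keep.append(line)
--     return keep
-- ===== SOURCE B (Python) =====
-- def _rm_toc(md: str) -> list:
--     """Removes table-of-contents sections from a markdown string, returning list of lines"""
--     check = md.lower()
--     if "table of contents" not in check and "contents" not in check:
--         return md.splitlines()
--     lines = md.splitlines()
--     n = len(lines)
--     keep = []
--     i = 0
--     while i < n:
--         clean = lines[i].lstrip()
--         if clean.startswith("#") and clean.lstrip("#").strip().lower() in ("table of contents", "contents"):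
--             # skip the TOC heading and its body up to the next heading
--             i += 1
--             while i < n and not lines[i].lstrip().startswith("#"):
--                 i += 1
--             # the heading ending the section is kept and not re-examined
--             if i < n:
--                 keep.append(lines[i])
--                 i += 1
--         else:
--             keep.append(lines[i])
--             i += 1
--     return keep
-- ===== Notes on version B (the rewrite author's own statement) =====
-- stated objective: alternative
-- what changed: Replaced A's single pass with persistent in_toc/removed_toc boolean flags by an explicit-index walk that, on meeting a TOC heading, consumes the whole section with an inner while loop and keeps the terminating heading without re-examining it.
import Mathlib
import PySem

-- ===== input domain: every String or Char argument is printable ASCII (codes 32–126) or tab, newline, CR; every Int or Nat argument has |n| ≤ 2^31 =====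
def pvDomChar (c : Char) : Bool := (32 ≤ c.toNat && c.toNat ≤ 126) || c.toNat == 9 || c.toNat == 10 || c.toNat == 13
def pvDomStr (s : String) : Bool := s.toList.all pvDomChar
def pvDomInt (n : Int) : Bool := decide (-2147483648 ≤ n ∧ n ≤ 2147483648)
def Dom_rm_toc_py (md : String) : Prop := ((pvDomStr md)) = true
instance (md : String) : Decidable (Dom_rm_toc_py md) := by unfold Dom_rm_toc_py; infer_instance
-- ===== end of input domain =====

-- B replaces A's persistent in_toc/removed_toc flag loop by an index walk that skips each
-- TOC section with an inner loop (objective: alternative decomposition, same cost).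

-- ===== PORT A =====
-- clean.lstrip("#") ported by hand (PySem has no left-only strip with a char set):
-- dropWhile (· == '#') is exact for the one-character set "#".
def pvLstripHash (clean : String) : String := String.mk (clean.toList.dropWhile (· == '#'))

-- loop body of A: state is (in_toc, removed_toc, keep)
def rmTocAStep (st : Bool × Bool × List String) (line : String) : Bool × Bool × List String :=
  let clean := PySem.Str.lstrip line
  if PySem.Str.startswith clean "#" && !st.2.1 then
    if st.1 then (false, st.2.1, st.2.2 ++ [line])
    else
      let title := PySem.Str.lower (PySem.Str.strip (pvLstripHash clean))
      if title = "table of contents" ∨ title = "contents" then (true, st.2.1, st.2.2)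
      else (st.1, st.2.1, st.2.2 ++ [line])
  else if !st.1 then (st.1, st.2.1, st.2.2 ++ [line])
  else st

def rm_toc_py (md : String) : List String :=
  let check := PySem.Str.lower md
  if !(PySem.Str.isIn "table of contents" check) && !(PySem.Str.isIn "contents" check) then
    PySem.Str.splitlines md
  else
    ((PySem.Str.splitlines md).foldl rmTocAStep (false, false, [])).2.2

-- ===== PORT B =====
def pvIsHead (line : String) : Bool := PySem.Str.startswith (PySem.Str.lstrip line) "#"

def pvIsTocHead (line : String) : Bool :=
  let clean := PySem.Str.lstrip line
  PySem.Str.startswith clean "#" &&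
    (let t := PySem.Str.lower (PySem.Str.strip (pvLstripHash clean));
     t == "table of contents" || t == "contents")

mutual
-- outer while loop of B over the remaining lines
def rmTocBWalk : List String → List String
  | [] => []
  | l :: rest => if pvIsTocHead l then rmTocBSkip rest else l :: rmTocBWalk rest
-- inner while loop: consume the TOC body; the terminating heading is kept, not re-examined
def rmTocBSkip : List String → List String
  | [] => []
  | l :: rest => if pvIsHead l then l :: rmTocBWalk rest else rmTocBSkip rest
end

def rm_toc_py_alt (md : String) : List String :=
  let check := PySem.Str.lower md
  if !(PySem.Str.isIn "table of contents" check) && !(PySem.Str.isIn "contents" check) then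
    PySem.Str.splitlines md
  else
    rmTocBWalk (PySem.Str.splitlines md)

-- ===== PRECONDITION & SPEC =====
def Spec_rm_toc_py (md : String) (out : List String) : Prop := out = rm_toc_py_alt md
instance (md : String) (out : List String) : Decidable (Spec_rm_toc_py md out) := by unfold Spec_rm_toc_py; infer_instance

-- ===== CLAIM (what is proved, stated in full; the proofs are below) =====
def Claim_equal_rm_toc_py : Prop := ∀ (md : String), Dom_rm_toc_py md → Spec_rm_toc_py md (rm_toc_py md)

-- ===== LEMMAS AND PROOFS =====
-- A's fold from state (b, false, keep) yields keep ++ (skip if b else walk) of the remaining lines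
lemma foldA_eq (lines : List String) : ∀ (b : Bool) (keep : List String),
    ((lines.foldl rmTocAStep (b, false, keep)).2.2)
      = keep ++ (if b then rmTocBSkip lines else rmTocBWalk lines) := by
  induction lines with
  | nil => intro b keep; cases b <;> simp [rmTocBSkip, rmTocBWalk]
  | cons l rest ih =>
    intro b keep
    simp only [List.foldl_cons, rmTocAStep, rmTocBWalk, rmTocBSkip, pvIsTocHead, pvIsHead]
    cases b with
    | true =>
      by_cases h : PySem.Chars.startswith (PySem.Chars.lstrip l.toList) ['#'] = true
      · simp [h, ih]
      · simp [h, ih]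
    | false =>
      by_cases h : PySem.Chars.startswith (PySem.Chars.lstrip l.toList) ['#'] = true
      · by_cases ht : PySem.Str.lower (PySem.Str.strip (pvLstripHash (PySem.Str.lstrip l)))
              = "table of contents" ∨
            PySem.Str.lower (PySem.Str.strip (pvLstripHash (PySem.Str.lstrip l))) = "contents"
        · have hb : (PySem.Str.lower (PySem.Str.strip (pvLstripHash (PySem.Str.lstrip l)))
              == "table of contents" ||
              PySem.Str.lower (PySem.Str.strip (pvLstripHash (PySem.Str.lstrip l))) == "contents")
              = true := by
            rcases ht with ht | ht <;> simp [ht]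
          simp [h, ht, hb, ih]
        · have hb : (PySem.Str.lower (PySem.Str.strip (pvLstripHash (PySem.Str.lstrip l)))
              == "table of contents" ||
              PySem.Str.lower (PySem.Str.strip (pvLstripHash (PySem.Str.lstrip l))) == "contents")
              = false := by
            simp only [not_or] at ht
            simp [ht.1, ht.2]
          simp [h, ht, hb, ih]
      · simp [h, ih]

-- ===== VERDICT (by name: the statement is the Claim_ definition above) =====
theorem rm_toc_py_spec : Claim_equal_rm_toc_py := by
  intro md _
  unfold Spec_rm_toc_py rm_toc_py rm_toc_py_alt
  simp only [foldA_eq]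
  split <;> simp
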